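-- pv_equiv track=rewrite | github.com/simontonner/neural-quantum-tomo | experiments_merge/playground/training_loader_adapter.py | _infer_basis_order
-- ===== SOURCE A (Python) =====
-- from typing import Iterable, List, Tuple, Optional
-- from typing import Iterable, List, Tuple, Optional
--
-- def _sliding_window_bases(window: Tuple[str, ...], num_qubits: int, background: str = "Z") -> List[str]:
--     """Slide `window` over a `background` string, return codes as strings."""
--     w = list(window)
--     L = len(w)
--     if L == 0 or L > num_qubits:
--         return []
--     out = []
--     for i in range(0, num_qubits - L + 1):
--         b = [background] * num_qubits
--         b[i:i + L] = w
--         out.append("".join(b))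
--     return out
--
-- def _infer_basis_order(codes_sorted: List[str], nqubits: int) -> List[str]:
--     """
--     Canonical order (matching generator):
--       Z^N,
--       sliding 'XX' over Z,
--       sliding 'XY' over Z,
--       then any remaining codes in sorted order.
--     """
--     codes_set = set(codes_sorted)
--     order: List[str] = []
--
--     z_code = "Z" * nqubits
--     if z_code in codes_set:
--         order.append(z_code)
--
--     for w in [("X", "X"), ("X", "Y")]:
--         for b in _sliding_window_bases(w, nqubits, background="Z"):
--             if b in codes_set and b not in order:
--                 order.append(b)
--
--     for c in codes_sorted:
--         if c not in order:
--             order.append(c)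
--
--     return order
-- ===== SOURCE B (Python) =====
-- from typing import List
--
-- def _infer_basis_order(codes_sorted: List[str], nqubits: int) -> List[str]:
--     # Build the canonical candidate list once and index each code by its rank.
--     candidates = ["Z" * nqubits]
--     for w in ("XX", "XY"):
--         for i in range(nqubits - 1):
--             candidates.append("Z" * i + w + "Z" * (nqubits - 2 - i))
--     rank = {c: r for r, c in enumerate(candidates)}
--     ranked: List[str] = []
--     rest: List[str] = []
--     seen = set()
--     for c in codes_sorted:
--         if c in seen:
--             continue
--         seen.add(c)
--         (ranked if c in rank else rest).append(c)
--     ranked.sort(key=rank.__getitem__)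
--     return ranked + rest
-- ===== Notes on version B (the rewrite author's own statement) =====
-- stated objective: faster
-- what changed: Replaces A's grow-and-scan loops (set lookup plus linear 'not in order' rescans of the growing result, per window and per remaining code) by building the canonical candidate list once with a code->rank dict, then a single partitioning pass over codes_sorted with a seen-set and one stable sort of the present candidates by rank.
import Mathlib
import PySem

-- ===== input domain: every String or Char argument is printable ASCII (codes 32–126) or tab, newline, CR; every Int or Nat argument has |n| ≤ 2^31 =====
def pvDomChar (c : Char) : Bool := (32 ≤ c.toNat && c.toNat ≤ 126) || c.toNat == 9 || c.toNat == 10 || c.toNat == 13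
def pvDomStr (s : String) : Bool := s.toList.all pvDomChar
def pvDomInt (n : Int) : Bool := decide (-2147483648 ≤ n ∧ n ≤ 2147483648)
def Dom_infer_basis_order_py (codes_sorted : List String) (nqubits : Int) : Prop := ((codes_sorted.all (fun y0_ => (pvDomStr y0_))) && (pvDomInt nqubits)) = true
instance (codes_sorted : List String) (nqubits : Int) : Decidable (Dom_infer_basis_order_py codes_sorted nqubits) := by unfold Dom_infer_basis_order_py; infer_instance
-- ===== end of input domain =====

-- B replaces A's grow-and-scan membership loops by a precomputed candidate/rank table,
-- a single partitioning pass over codes_sorted with a seen-set, and one keyed sort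
-- (measured faster; A's Python rescans the growing `order` list per element).


-- ===== PORT A =====
-- _sliding_window_bases: the slice assignment b[i:i+L] = w is b[:i] ++ w ++ b[i+L:] (exact)
def pySlidingWindowBases (window : List String) (numQubits : Int) (background : String) : List String :=
  let w := window
  let L : Int := (w.length : Int)
  if L = 0 ∨ numQubits < L then []
  else
    (PySem.List.pyRange 0 (numQubits - L + 1)).foldl
      (fun out i =>
        let b := PySem.List.pyRepeat [background] numQubits
        let b' := PySem.List.slice b none (some i) ++ w ++ PySem.List.slice b (some (i + L)) none
        out ++ [PySem.Str.join "" b']) []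

def infer_basis_order_py (codes_sorted : List String) (nqubits : Int) : List String :=
  let codes_set : PySem.Set String := PySem.Set.ofList codes_sorted
  let order : List String := []
  -- z_code = "Z" * nqubits (Python string repetition: max(nqubits, 0) copies; exact)
  let z_code : String := String.ofList (PySem.List.pyRepeat ['Z'] nqubits)
  let order := if z_code ∈ codes_set then order ++ [z_code] else order
  let order := [["X", "X"], ["X", "Y"]].foldl
    (fun order w =>
      (pySlidingWindowBases w nqubits "Z").foldl
        (fun order b => if b ∈ codes_set ∧ b ∉ order then order ++ [b] else order) order) order
  codes_sorted.foldl (fun order c => if c ∉ order then order ++ [c] else order) order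

-- ===== PORT B =====
def infer_basis_order_py_alt (codes_sorted : List String) (nqubits : Int) : List String :=
  -- candidates = ["Z"*n] then "Z"*i + w + "Z"*(n-2-i) for w in ("XX","XY"), i in range(n-1)
  let candidates : List String := [String.ofList (PySem.List.pyRepeat ['Z'] nqubits)]
  let candidates := ["XX", "XY"].foldl
    (fun cand w =>
      (PySem.List.pyRange 0 (nqubits - 1)).foldl
        (fun cand i =>
          cand ++ [String.ofList (PySem.List.pyRepeat ['Z'] i ++ w.toList ++ PySem.List.pyRepeat ['Z'] (nqubits - 2 - i))]) cand) candidates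
  -- rank = {c: r for r, c in enumerate(candidates)}
  let rank : PySem.Dict String Int :=
    (PySem.List.enumerate candidates).foldl (fun d rc => d.insert rc.2 rc.1) PySem.Dict.empty
  -- one pass over codes_sorted: skip seen, partition by membership in rank
  let acc := codes_sorted.foldl
    (fun (acc : List String × List String × PySem.Set String) c =>
      if c ∈ acc.2.2 then acc
      else
        if rank.contains c then (acc.1 ++ [c], acc.2.1, PySem.Set.add acc.2.2 c)
        else (acc.1, acc.2.1 ++ [c], PySem.Set.add acc.2.2 c))
    ([], [], PySem.Set.empty)
  -- ranked.sort(key=rank.__getitem__): every ranked code is a key of rank, so the getD default is never read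
  PySem.List.sorted acc.1 (fun c => rank.getD c 0) ++ acc.2.1

-- ===== PRECONDITION & SPEC =====
def Spec_infer_basis_order_py (codes_sorted : List String) (nqubits : Int) (out : List String) : Prop := out = infer_basis_order_py_alt codes_sorted nqubits
instance (codes_sorted : List String) (nqubits : Int) (out : List String) : Decidable (Spec_infer_basis_order_py codes_sorted nqubits out) := by unfold Spec_infer_basis_order_py; infer_instance

-- ===== CLAIM (what is proved, stated in full; the proofs are below) =====
def Claim_equal_infer_basis_order_py : Prop := ∀ (codes_sorted : List String) (nqubits : Int), Dom_infer_basis_order_py codes_sorted nqubits → Spec_infer_basis_order_py codes_sorted nqubits (infer_basis_order_py codes_sorted nqubits)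

-- ===== LEMMAS AND PROOFS =====

-- The canonical candidate list: Z^n, the XX windows, the XY windows.
def zS (n : Int) : String := String.ofList (List.replicate n.toNat 'Z')
def winS (a b : Char) (n i : Int) : String :=
  String.ofList (List.replicate i.toNat 'Z' ++ [a, b] ++ List.replicate (n - 2 - i).toNat 'Z')
def winL (a b : Char) (n : Int) : List String :=
  (PySem.List.pyRange 0 (n - 1)).map (fun i => winS a b n i)
def candL (n : Int) : List String := zS n :: (winL 'X' 'X' n ++ winL 'X' 'Y' n)
def rankD (n : Int) : PySem.Dict String Int :=
  (PySem.List.enumerate (candL n)).foldl (fun d rc => d.insert rc.2 rc.1) PySem.Dict.empty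

lemma flatten_replicate_singleton (k : Nat) (c : Char) :
    (List.replicate k ([c] : List Char)).flatten = List.replicate k c := by
  induction k with
  | zero => rfl
  | succ k ih => simp [List.replicate_succ, ih]

lemma join_empty_eq_flatten (ps : List (List Char)) : PySem.Chars.join [] ps = ps.flatten := by
  induction ps with
  | nil => simp [PySem.Chars.join_nil]
  | cons p ps ih =>
    cases ps with
    | nil => simp [PySem.Chars.join_singleton]
    | cons q rest => simp [PySem.Chars.join_cons_cons, ih]

lemma toList_join_empty (parts : List String) :
    (PySem.Str.join "" parts).toList = (parts.map String.toList).flatten := by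
  rw [PySem.Str.toList_join, show ("" : String).toList = [] from rfl, join_empty_eq_flatten]

lemma sliding_eq (n : Int) (c1 c2 : String) (a b : Char)
    (h1 : c1.toList = [a]) (h2 : c2.toList = [b]) :
    pySlidingWindowBases [c1, c2] n "Z" = winL a b n := by
  unfold pySlidingWindowBases winL
  by_cases hn : n < 2
  · rw [if_pos (by simp; omega)]
    rw [PySem.List.pyRange_one_eq_nil (by omega)]
    simp
  · rw [if_neg (by simp; omega)]
    simp only [List.length_cons, List.length_nil]
    rw [PySem.List.foldl_append_singleton_eq_map
      (f := fun i => PySem.Str.join ""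
        (PySem.List.slice (PySem.List.pyRepeat ["Z"] n) none (some i) ++ [c1, c2] ++
          PySem.List.slice (PySem.List.pyRepeat ["Z"] n) (some (i + (((0:Nat)+1+1 : Nat) : Int))) none))]
    rw [List.nil_append]
    have harg : n - (((0:Nat)+1+1 : Nat) : Int) + 1 = n - 1 := by push_cast; ring
    rw [harg]
    apply List.map_congr_left
    intro i hi
    rw [PySem.List.mem_pyRange_one] at hi
    apply String.toList_inj.mp
    rw [toList_join_empty, winS, String.toList_ofList]
    have hrep : PySem.List.pyRepeat ["Z"] n = List.replicate n.toNat ("Z" : String) :=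
      PySem.List.pyRepeat_singleton _ _
    rw [hrep, PySem.List.slice_to _ (by omega), PySem.List.slice_from _ (by push_cast; omega)]
    rw [List.take_replicate, List.drop_replicate]
    simp only [List.map_append, List.map_replicate, List.map_cons, List.map_nil, h1, h2]
    rw [show ("Z" : String).toList = ['Z'] from by simp]
    rw [List.flatten_append, List.flatten_append]
    rw [flatten_replicate_singleton, flatten_replicate_singleton]
    have e1 : min i.toNat n.toNat = i.toNat := by omega
    have e2 : n.toNat - (i + (((0:Nat)+1+1 : Nat) : Int)).toNat = (n - 2 - i).toNat := by
      push_cast; omega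
    rw [e1, e2]
    simp

-- Phase-1 loop shape: appending candidates that are in S and not yet collected,
-- over a duplicate-free list disjoint from the accumulator, is accumulator ++ filter.
lemma foldl_memfilter (S : List String) :
    ∀ (l init : List String), l.Nodup → (∀ x ∈ l, x ∉ init) →
      l.foldl (fun order b => if b ∈ S ∧ b ∉ order then order ++ [b] else order) init
        = init ++ l.filter (fun b => decide (b ∈ S)) := by
  intro l
  induction l with
  | nil => intro init _ _; simp
  | cons x l ih =>
    intro init hnd hdisj
    simp only [List.foldl_cons, List.filter_cons]
    by_cases hx : x ∈ S
    · rw [if_pos ⟨hx, hdisj x (by simp)⟩, ih _ hnd.of_cons ?_]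
      · simp [hx]
      · intro y hy
        simp only [List.mem_append, List.mem_singleton]
        rintro (h | rfl)
        · exact hdisj y (by simp [hy]) h
        · exact (List.nodup_cons.mp hnd).1 hy
    · rw [if_neg (by tauto), ih _ hnd.of_cons (fun y hy => hdisj y (by simp [hy]))]
      simp [hx]

lemma win_get (p q : Nat) (a b : Char) (k : Nat) :
    ((List.replicate p 'Z' ++ [a, b]) ++ List.replicate q 'Z')[k]? =
      if k < p then some 'Z' else if k = p then some a else if k = p + 1 then some b
      else if k < p + 2 + q then some 'Z' else none := by
  simp only [List.getElem?_append, List.length_append, List.length_replicate, List.length_cons,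
    List.length_nil, List.getElem?_replicate]
  split_ifs <;> first
    | rfl
    | (exfalso; omega)
    | (rename_i h1 h2 h3; rw [show k - p = 0 by omega]; rfl)
    | (rename_i h1 h2 h3 h4; rw [show k - p = 1 by omega]; rfl)

-- distinctness of the candidates, by comparing one character
lemma winS_ne_of_lt (b b' : Char) {n i j : Int} (h0 : 0 ≤ i) (hij : i < j) :
    winS 'X' b n i ≠ winS 'X' b' n j := by
  intro h
  have hl := congrArg (fun s => s.toList[i.toNat]?) h
  simp only [winS, String.toList_ofList] at hl
  rw [win_get, win_get] at hl
  simp only [lt_irrefl, if_false, if_pos (show i.toNat < j.toNat by omega), if_true] at hl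
  exact absurd hl (by decide)

lemma winS_snd_ne (n i : Int) : winS 'X' 'X' n i ≠ winS 'X' 'Y' n i := by
  intro h
  have hl := congrArg (fun s => s.toList[i.toNat + 1]?) h
  simp only [winS, String.toList_ofList] at hl
  rw [win_get, win_get] at hl
  simp only [show ¬(i.toNat + 1 < i.toNat) by omega, if_false,
    show ¬(i.toNat + 1 = i.toNat) by omega, if_true] at hl
  exact absurd hl (by decide)

lemma z_ne_win (b : Char) (n i : Int) (h0 : 0 ≤ i) (hi : i < n - 1) :
    zS n ≠ winS 'X' b n i := by
  intro h
  have hl := congrArg (fun s => s.toList[i.toNat]?) h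
  simp only [zS, winS, String.toList_ofList] at hl
  rw [win_get, List.getElem?_replicate] at hl
  simp only [show i.toNat < n.toNat by omega, lt_irrefl, if_false, if_true] at hl
  exact absurd hl (by decide)

lemma nodup_winL (b : Char) (n : Int) : (winL 'X' b n).Nodup := by
  apply List.Nodup.map_on _ (PySem.List.nodup_pyRange_one 0 (n - 1))
  intro x hx y hy hxy
  rw [PySem.List.mem_pyRange_one] at hx hy
  by_contra hne
  rcases lt_or_gt_of_ne hne with h | h
  · exact winS_ne_of_lt b b hx.1 h hxy
  · exact winS_ne_of_lt b b hy.1 h hxy.symm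

lemma winL_disjoint (n : Int) : ∀ x ∈ winL 'X' 'X' n, ∀ y ∈ winL 'X' 'Y' n, x ≠ y := by
  intro x hx y hy
  simp only [winL, List.mem_map] at hx hy
  obtain ⟨i, hi, rfl⟩ := hx
  obtain ⟨j, hj, rfl⟩ := hy
  rw [PySem.List.mem_pyRange_one] at hi hj
  rcases lt_trichotomy i j with h | rfl | h
  · exact winS_ne_of_lt 'X' 'Y' hi.1 h
  · exact winS_snd_ne n i
  · intro he; exact winS_ne_of_lt 'Y' 'X' hj.1 h he.symm

lemma z_not_mem_winL (b : Char) (n : Int) : zS n ∉ winL 'X' b n := by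
  intro h
  simp only [winL, List.mem_map] at h
  obtain ⟨i, hi, he⟩ := h
  rw [PySem.List.mem_pyRange_one] at hi
  exact z_ne_win b n i hi.1 hi.2 he.symm

lemma nodup_candL (n : Int) : (candL n).Nodup := by
  rw [candL, List.nodup_cons, List.nodup_append]
  refine ⟨?_, nodup_winL 'X' n, nodup_winL 'Y' n, winL_disjoint n⟩
  intro h
  rcases List.mem_append.mp h with h | h
  · exact z_not_mem_winL 'X' n h
  · exact z_not_mem_winL 'Y' n h

-- rank dictionary facts
lemma rankD_items (n : Int) :
    (rankD n).items = (PySem.List.enumerate (candL n)).map (fun rc => (rc.2, rc.1)) := by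
  rw [rankD]
  rw [PySem.Dict.items_foldl_insert_fresh (PySem.List.enumerate (candL n)) (fun rc => rc.2)
    (fun rc => rc.1) PySem.Dict.empty (fun a _ => PySem.Dict.contains_empty _) ?_]
  · rfl
  · rw [PySem.List.map_snd_enumerate]
    exact nodup_candL n

lemma rankD_keys (n : Int) : (rankD n).keys = candL n := by
  show (rankD n).items.map (·.1) = candL n
  rw [rankD_items, List.map_map]
  exact PySem.List.map_snd_enumerate (candL n) 0

lemma rankD_contains (n : Int) (c : String) : (rankD n).contains c = true ↔ c ∈ candL n := by
  rw [PySem.Dict.contains_iff_mem_keys, rankD_keys]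

lemma rankD_getD (n : Int) (i : Nat) (hi : i < (candL n).length) :
    (rankD n).getD (candL n)[i] 0 = (i : Int) := by
  apply PySem.Dict.getD_of_mem_items
  · rw [rankD_items, List.mem_map]
    refine ⟨((i : Int), (candL n)[i]), ?_, rfl⟩
    rw [PySem.List.enumerate_eq_map_pyRange (candL n) (zS n), List.mem_map]
    refine ⟨(i : Int), ?_, ?_⟩
    · rw [PySem.List.mem_pyRange_one, PySem.List.len]
      constructor <;> [positivity; exact_mod_cast hi]
    · rw [PySem.List.pyGetD_eq_getElem _ _ (by positivity) (by exact_mod_cast hi)]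
      simp
  · rw [rankD_keys]; exact nodup_candL n

lemma candL_pairwise_rank (n : Int) :
    (candL n).Pairwise (fun a b => (rankD n).getD a 0 < (rankD n).getD b 0) := by
  rw [List.pairwise_iff_getElem]
  intro i j hi hj hij
  rw [rankD_getD n i hi, rankD_getD n j hj]
  exact_mod_cast hij

-- the partitioning pass of B: the collected ranked list is duplicate-free and holds
-- exactly the codes seen so far that are keys of the rank dictionary
lemma bfold_ranked (d : PySem.Dict String Int) (cand : List String)
    (hd : ∀ c, d.contains c = true ↔ c ∈ cand) :
    ∀ (codes ranked rest seen : List String),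
      (∀ c, c ∈ seen ↔ (c ∈ ranked ∨ c ∈ rest)) →
      (∀ c ∈ ranked, c ∈ cand) → (∀ c ∈ rest, c ∉ cand) → ranked.Nodup →
      ((codes.foldl (fun (acc : List String × List String × PySem.Set String) c =>
          if c ∈ acc.2.2 then acc
          else
            if d.contains c then (acc.1 ++ [c], acc.2.1, PySem.Set.add acc.2.2 c)
            else (acc.1, acc.2.1 ++ [c], PySem.Set.add acc.2.2 c)) (ranked, rest, seen)).1.Nodup
      ∧ ∀ c, (c ∈ (codes.foldl (fun (acc : List String × List String × PySem.Set String) c =>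
          if c ∈ acc.2.2 then acc
          else
            if d.contains c then (acc.1 ++ [c], acc.2.1, PySem.Set.add acc.2.2 c)
            else (acc.1, acc.2.1 ++ [c], PySem.Set.add acc.2.2 c)) (ranked, rest, seen)).1
          ↔ (c ∈ ranked ∨ (c ∈ codes ∧ c ∈ cand)))) := by
  intro codes
  induction codes with
  | nil =>
    intro ranked rest seen hseen hranked hrest hnd
    simp only [List.foldl_nil]
    exact ⟨hnd, fun x => by simp⟩
  | cons c codes ih =>
    intro ranked rest seen hseen hranked hrest hnd
    simp only [List.foldl_cons]
    by_cases hs : c ∈ seen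
    · rw [if_pos hs]
      obtain ⟨h1, h2⟩ := ih ranked rest seen hseen hranked hrest hnd
      refine ⟨h1, fun x => (h2 x).trans ?_⟩
      constructor
      · rintro (h | h)
        · exact Or.inl h
        · exact Or.inr ⟨List.mem_cons_of_mem _ h.1, h.2⟩
      · rintro (h | ⟨hx, hc⟩)
        · exact Or.inl h
        · rcases List.mem_cons.mp hx with rfl | hx
          · rcases (hseen x).mp hs with h | h
            · exact Or.inl h
            · exact absurd hc (hrest x h)
          · exact Or.inr ⟨hx, hc⟩
    · rw [if_neg hs]
      by_cases hc : c ∈ cand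
      · rw [if_pos ((hd c).mpr hc)]
        have hcr : c ∉ ranked := fun h => hs ((hseen c).mpr (Or.inl h))
        have hseen' : ∀ x, x ∈ PySem.Set.add seen c ↔ (x ∈ ranked ++ [c] ∨ x ∈ rest) := by
          intro x
          rw [PySem.Set.mem_add, hseen x]
          simp only [List.mem_append, List.mem_singleton]
          tauto
        have hranked' : ∀ x ∈ ranked ++ [c], x ∈ cand := by
          intro x hx
          rcases List.mem_append.mp hx with h | h
          · exact hranked x h
          · rw [List.mem_singleton] at h; subst h; exact hc
        have hnd' : (ranked ++ [c]).Nodup := by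
          rw [List.nodup_append]
          exact ⟨hnd, List.nodup_singleton c, fun a ha b hb => by
            rw [List.mem_singleton] at hb; subst hb; exact fun he => hcr (he ▸ ha)⟩
        obtain ⟨h1, h2⟩ := ih (ranked ++ [c]) rest (PySem.Set.add seen c) hseen' hranked' hrest hnd'
        refine ⟨h1, fun x => (h2 x).trans ?_⟩
        simp only [List.mem_append, List.mem_cons, List.not_mem_nil, or_false]
        constructor
        · rintro ((h | rfl) | h)
          · exact Or.inl h
          · exact Or.inr ⟨Or.inl rfl, hc⟩
          · exact Or.inr ⟨Or.inr h.1, h.2⟩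
        · rintro (h | ⟨rfl | hx, hcx⟩)
          · exact Or.inl (Or.inl h)
          · exact Or.inl (Or.inr rfl)
          · exact Or.inr ⟨hx, hcx⟩
      · rw [if_neg (fun h => hc ((hd c).mp h))]
        have hseen' : ∀ x, x ∈ PySem.Set.add seen c ↔ (x ∈ ranked ∨ x ∈ rest ++ [c]) := by
          intro x
          rw [PySem.Set.mem_add, hseen x]
          simp only [List.mem_append, List.mem_singleton]
          tauto
        have hrest' : ∀ x ∈ rest ++ [c], x ∉ cand := by
          intro x hx
          rcases List.mem_append.mp hx with h | h
          · exact hrest x h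
          · rw [List.mem_singleton] at h; subst h; exact hc
        obtain ⟨h1, h2⟩ := ih ranked (rest ++ [c]) (PySem.Set.add seen c) hseen' hranked hrest' hnd
        refine ⟨h1, fun x => (h2 x).trans ?_⟩
        simp only [List.mem_cons]
        constructor
        · rintro (h | h)
          · exact Or.inl h
          · exact Or.inr ⟨Or.inr h.1, h.2⟩
        · rintro (h | ⟨rfl | hx, hcx⟩)
          · exact Or.inl h
          · exact absurd hcx hc
          · exact Or.inr ⟨hx, hcx⟩

-- A's final loop and B's partitioning pass build the same tail of leftover codes
lemma tail_eq (d : PySem.Dict String Int) (cand codesAll pre1 : List String)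
    (hpre : ∀ c, c ∈ pre1 ↔ (c ∈ cand ∧ c ∈ codesAll))
    (hd : ∀ c, d.contains c = true ↔ c ∈ cand) :
    ∀ (codes ranked rest seen : List String),
      (∀ c ∈ codes, c ∈ codesAll) →
      (∀ c, c ∈ seen ↔ (c ∈ ranked ∨ c ∈ rest)) →
      (∀ c ∈ ranked, c ∈ cand) → (∀ c ∈ rest, c ∉ cand) →
      codes.foldl (fun order c => if c ∉ order then order ++ [c] else order) (pre1 ++ rest)
        = pre1 ++ (codes.foldl (fun (acc : List String × List String × PySem.Set String) c =>
            if c ∈ acc.2.2 then acc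
            else
              if d.contains c then (acc.1 ++ [c], acc.2.1, PySem.Set.add acc.2.2 c)
              else (acc.1, acc.2.1 ++ [c], PySem.Set.add acc.2.2 c)) (ranked, rest, seen)).2.1 := by
  intro codes
  induction codes with
  | nil => intro ranked rest seen _ _ _ _; simp
  | cons c codes ih =>
    intro ranked rest seen hsub hseen hranked hrest
    simp only [List.foldl_cons]
    by_cases hc : c ∈ cand
    · have hA : c ∈ pre1 ++ rest :=
        List.mem_append.mpr (Or.inl ((hpre c).mpr ⟨hc, hsub c (by simp)⟩))
      rw [if_neg (not_not_intro hA)]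
      by_cases hs : c ∈ seen
      · rw [if_pos hs]
        exact ih ranked rest seen (fun x hx => hsub x (by simp [hx])) hseen hranked hrest
      · rw [if_neg hs, if_pos ((hd c).mpr hc)]
        have hseen' : ∀ x, x ∈ PySem.Set.add seen c ↔ (x ∈ ranked ++ [c] ∨ x ∈ rest) := by
          intro x
          rw [PySem.Set.mem_add, hseen x]
          simp only [List.mem_append, List.mem_singleton]
          tauto
        have hranked' : ∀ x ∈ ranked ++ [c], x ∈ cand := by
          intro x hx
          rcases List.mem_append.mp hx with h | h
          · exact hranked x h
          · rw [List.mem_singleton] at h; subst h; exact hc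
        exact ih (ranked ++ [c]) rest (PySem.Set.add seen c)
          (fun x hx => hsub x (by simp [hx])) hseen' hranked' hrest
    · by_cases hr : c ∈ rest
      · rw [if_neg (not_not_intro (List.mem_append.mpr (Or.inr hr))),
          if_pos ((hseen c).mpr (Or.inr hr))]
        exact ih ranked rest seen (fun x hx => hsub x (by simp [hx])) hseen hranked hrest
      · have hA : c ∉ pre1 ++ rest := by
          intro h
          rcases List.mem_append.mp h with h | h
          · exact hc ((hpre c).mp h).1
          · exact hr h
        rw [if_pos hA]
        have hs : c ∉ seen := by
          intro h
          rcases (hseen c).mp h with h | h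
          · exact hc (hranked c h)
          · exact hr h
        rw [if_neg hs, if_neg (fun h => hc ((hd c).mp h)), List.append_assoc]
        have hseen' : ∀ x, x ∈ PySem.Set.add seen c ↔ (x ∈ ranked ∨ x ∈ rest ++ [c]) := by
          intro x
          rw [PySem.Set.mem_add, hseen x]
          simp only [List.mem_append, List.mem_singleton]
          tauto
        have hrest' : ∀ x ∈ rest ++ [c], x ∉ cand := by
          intro x hx
          rcases List.mem_append.mp hx with h | h
          · exact hrest x h
          · rw [List.mem_singleton] at h; subst h; exact hc
        exact ih ranked (rest ++ [c]) (PySem.Set.add seen c)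
          (fun x hx => hsub x (by simp [hx])) hseen' hranked hrest'

-- B's candidate-building loop produces candL
lemma candB_eq (n : Int) :
    (PySem.List.pyRange 0 (n - 1)).foldl
      (fun cand i =>
        cand ++ [String.ofList (PySem.List.pyRepeat ['Z'] i ++ ("XY" : String).toList ++ PySem.List.pyRepeat ['Z'] (n - 2 - i))])
      ((PySem.List.pyRange 0 (n - 1)).foldl
        (fun cand i =>
          cand ++ [String.ofList (PySem.List.pyRepeat ['Z'] i ++ ("XX" : String).toList ++ PySem.List.pyRepeat ['Z'] (n - 2 - i))])
        [zS n]) = candL n := by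
  rw [PySem.List.foldl_append_singleton_eq_map
    (f := fun i => String.ofList (PySem.List.pyRepeat ['Z'] i ++ ("XX" : String).toList ++ PySem.List.pyRepeat ['Z'] (n - 2 - i)))]
  rw [PySem.List.foldl_append_singleton_eq_map
    (f := fun i => String.ofList (PySem.List.pyRepeat ['Z'] i ++ ("XY" : String).toList ++ PySem.List.pyRepeat ['Z'] (n - 2 - i)))]
  rw [candL, List.append_assoc,
    show (zS n :: (winL 'X' 'X' n ++ winL 'X' 'Y' n))
      = [zS n] ++ (winL 'X' 'X' n ++ winL 'X' 'Y' n) from rfl]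
  congr 1
  congr 1 <;>
  · apply List.map_congr_left
    intro i _
    rw [winS, PySem.List.pyRepeat_singleton, PySem.List.pyRepeat_singleton]
    simp

theorem infer_basis_order_py_spec_aux (codes_sorted : List String) (nqubits : Int) :
    infer_basis_order_py codes_sorted nqubits = infer_basis_order_py_alt codes_sorted nqubits := by
  simp only [infer_basis_order_py, infer_basis_order_py_alt, List.foldl_cons, List.foldl_nil]
  rw [sliding_eq nqubits "X" "X" 'X' 'X' (by simp) (by simp),
    sliding_eq nqubits "X" "Y" 'X' 'Y' (by simp) (by simp),
    show String.ofList (PySem.List.pyRepeat ['Z'] nqubits) = zS nqubits from by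
      rw [zS, PySem.List.pyRepeat_singleton]]
  simp only [candB_eq nqubits]
  have hr : (PySem.List.enumerate (candL nqubits)).foldl (fun d rc => d.insert rc.2 rc.1)
      PySem.Dict.empty = rankD nqubits := rfl
  simp only [hr]
  set S : PySem.Set String := PySem.Set.ofList codes_sorted with hS
  set init0 : List String := if zS nqubits ∈ S then [] ++ [zS nqubits] else [] with hinit0
  have hinit_sub : ∀ x, x ∈ init0 → x = zS nqubits := by
    intro x hx
    rw [hinit0] at hx
    split_ifs at hx
    · simpa using hx
    · simp at hx
  have hxx := foldl_memfilter S (winL 'X' 'X' nqubits) init0 (nodup_winL 'X' nqubits)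
    (fun x hx hmem => z_not_mem_winL 'X' nqubits ((hinit_sub x hmem) ▸ hx))
  have hxy := foldl_memfilter S (winL 'X' 'Y' nqubits)
    (init0 ++ (winL 'X' 'X' nqubits).filter (fun b => decide (b ∈ S)))
    (nodup_winL 'Y' nqubits) ?hdisj2
  case hdisj2 =>
    intro x hx hmem
    rcases List.mem_append.mp hmem with h | h
    · exact z_not_mem_winL 'Y' nqubits ((hinit_sub x h) ▸ hx)
    · exact winL_disjoint nqubits x (List.mem_of_mem_filter h) x hx rfl
  rw [hxx, hxy]
  set pre1 : List String := (candL nqubits).filter (fun b => decide (b ∈ S)) with hpre1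
  have hassemble : init0 ++ (winL 'X' 'X' nqubits).filter (fun b => decide (b ∈ S))
      ++ (winL 'X' 'Y' nqubits).filter (fun b => decide (b ∈ S)) = pre1 := by
    rw [hpre1, hinit0, candL, List.filter_cons, List.filter_append]
    by_cases hz : zS nqubits ∈ S <;> simp [hz]
  rw [hassemble]
  have hpre : ∀ c, c ∈ pre1 ↔ (c ∈ candL nqubits ∧ c ∈ codes_sorted) := by
    intro c
    rw [hpre1, List.mem_filter, decide_eq_true_iff, hS, PySem.Set.mem_ofList]
  have htail := tail_eq (rankD nqubits) (candL nqubits) codes_sorted pre1 hpre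
    (rankD_contains nqubits) codes_sorted [] [] PySem.Set.empty
    (fun c hc => hc) (fun c => by simp [PySem.Set.empty]) (fun c hc => by simp at hc)
    (fun c hc => by simp at hc)
  rw [List.append_nil] at htail
  rw [htail]
  congr 1
  obtain ⟨hndR, hmemR⟩ := bfold_ranked (rankD nqubits) (candL nqubits) (rankD_contains nqubits)
    codes_sorted [] [] PySem.Set.empty (fun c => by simp [PySem.Set.empty])
    (fun c hc => by simp at hc) (fun c hc => by simp at hc) List.nodup_nil
  symm
  apply PySem.List.sorted_eq_of_perm_of_pairwise_lt _ pre1 (fun c => (rankD nqubits).getD c 0)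
  · have hnd1 : pre1.Nodup := by rw [hpre1]; exact (nodup_candL nqubits).filter _
    rw [List.perm_ext_iff_of_nodup hnd1 hndR]
    intro c
    rw [hpre c, hmemR c]
    simp [and_comm]
  · exact (candL_pairwise_rank nqubits).sublist List.filter_sublist

-- ===== VERDICT (by name: the statement is the Claim_ definition above) =====
theorem infer_basis_order_py_spec : Claim_equal_infer_basis_order_py := by
  intro codes_sorted nqubits _
  exact infer_basis_order_py_spec_aux codes_sorted nqubits
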